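-- pv_equiv track=rewrite | github.com/pbobdelux/opsyn-backend | opsyn/routers/derived.py | _customer_id_from_name
-- ===== SOURCE A (Python) =====
-- def _customer_id_from_name(name: str) -> str:
--     cleaned = (name or "unknown").strip().lower()
--     cleaned = cleaned.replace("&", "and")
--     allowed = []
--     for ch in cleaned:
--         if ch.isalnum():
--             allowed.append(ch)
--         elif ch in (" ", "-", "_"):
--             allowed.append("-")
--     slug = "".join(allowed).strip("-")
--     while "--" in slug:
--         slug = slug.replace("--", "-")
--     return slug or "unknown-customer"
-- ===== SOURCE B (Python) =====
-- def _customer_id_from_name(name: str) -> str: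
--     cleaned = (name or "unknown").strip().lower().replace("&", "and")
--     out = []
--     pending = False
--     for ch in cleaned:
--         if ch.isalnum():
--             if pending and out:
--                 out.append("-")
--             out.append(ch)
--             pending = False
--         elif ch in " -_":
--             pending = True
--     return "".join(out) or "unknown-customer"
-- ===== Notes on version B (the rewrite author's own statement) =====
-- stated objective: simpler
-- what changed: A builds a list of kept chars and dashes, joins it, strips boundary dashes and collapses dash runs with a while-loop of string replaces; B does one pass with a pending-dash flag that emits a single dash only between alphanumeric output, so the strip step and the collapse loop disappear.
import Mathlib
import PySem

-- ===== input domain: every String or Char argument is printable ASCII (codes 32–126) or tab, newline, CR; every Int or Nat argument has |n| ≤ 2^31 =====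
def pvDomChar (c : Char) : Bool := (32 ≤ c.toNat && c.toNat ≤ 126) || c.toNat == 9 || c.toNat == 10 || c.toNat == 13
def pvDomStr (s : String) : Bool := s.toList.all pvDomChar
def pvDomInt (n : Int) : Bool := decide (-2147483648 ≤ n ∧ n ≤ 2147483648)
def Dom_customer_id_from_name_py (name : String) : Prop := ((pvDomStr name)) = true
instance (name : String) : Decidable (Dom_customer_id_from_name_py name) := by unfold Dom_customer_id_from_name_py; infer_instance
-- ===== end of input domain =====

-- B replaces A's build-then-postprocess (append chars/dashes, strip '-', repeated "--"→"-" passes)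
-- by a single pass with a pending-dash flag; objective: simpler. Return values proved equal for all inputs.

-- ===== PORT A =====
-- Termination helpers for the port of A's `while "--" in slug:` loop (cited by `decreasing_by`):
-- `repDD` is what one pass of slug.replace("--", "-") computes, and it strictly shortens the
-- string while "--" occurs, so the while loop terminates.

-- what Python's s.replace("--", "-") computes (non-overlapping, left to right)
def repDD : List Char → List Char
  | c :: d :: t => if c = '-' ∧ d = '-' then '-' :: repDD t else c :: repDD (d :: t)
  | l => l

-- Bool form of ‹"--" occurs in l›
def hasDD : List Char → Bool
  | '-' :: '-' :: _ => true
  | _ :: t => hasDD t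
  | [] => false

theorem go_eq_repDD (fuel : Nat) (l acc : List Char) (h : l.length ≤ fuel) :
    PySem.Chars.replace.go ['-','-'] ['-'] fuel l acc = acc.reverse ++ repDD l := by
  induction fuel generalizing l acc with
  | zero =>
    have hl : l = [] := by cases l with
      | nil => rfl
      | cons c t => simp at h
    subst hl
    simp [PySem.Chars.replace.go, repDD]
  | succ f ih =>
    match l with
    | [] => simp [PySem.Chars.replace.go, repDD]
    | [c] =>
      rw [PySem.Chars.replace.go]
      have hp : ['-','-'].isPrefixOf ([c]) = false := by simp [List.isPrefixOf]
      simp only [hp]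
      rw [ih [] (c::acc) (by simp)]
      simp [repDD]
    | c :: d :: t =>
      rw [PySem.Chars.replace.go]
      have hp : ['-','-'].isPrefixOf (c::d::t) = (c == '-' && d == '-') := by
        simp [List.isPrefixOf, Bool.beq_comm]
      by_cases hc : c = '-' ∧ d = '-'
      · have : ['-','-'].isPrefixOf (c::d::t) = true := by simp [hc.1, hc.2]
        simp only [this, if_pos]
        show PySem.Chars.replace.go ['-','-'] ['-'] f t ('-' :: acc) = _
        rw [ih t ('-'::acc) (by simp at h ⊢; omega)]
        simp [repDD, hc.1, hc.2]
      · have : ['-','-'].isPrefixOf (c::d::t) = false := by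
          rw [hp]; rcases not_and_or.mp hc with h'|h' <;> simp [h']
        simp only [this, Bool.false_eq_true, if_neg, not_false_iff]
        rw [ih (d::t) (c::acc) (by simp at h ⊢; omega)]
        simp [repDD, hc]

theorem replace_eq_repDD (s : List Char) :
    PySem.Chars.replace s ['-','-'] ['-'] = repDD s := by
  rw [PySem.Chars.replace]
  simp only [List.isEmpty_cons, Bool.false_eq_true, if_neg, not_false_iff]
  rw [go_eq_repDD s.length s [] le_rfl]; rfl

theorem repDD_length_le (l : List Char) : (repDD l).length ≤ l.length := by
  fun_induction repDD with
  | case1 c d t hcd ih => simp at *; omega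
  | case2 c d t hcd ih => simp at *; omega
  | case3 l hl => simp

theorem hasDD_iff (l : List Char) : hasDD l = true ↔ ['-','-'] <:+: l := by
  fun_induction hasDD with
  | case1 t => simp; exact ⟨[], t, by simp⟩
  | case2 c t hg ih =>
    rw [ih]
    constructor
    · intro h'
      exact List.infix_cons_iff.mpr (Or.inr h')
    · intro h'
      rcases List.infix_cons_iff.mp h' with h'' | h''
      · rcases h'' with ⟨r, hr⟩
        simp at hr
        exact (hg r hr.1.symm hr.2.symm).elim
      · exact h''
  | case3 => simp

theorem repDD_length_lt (l : List Char) (h : hasDD l = true) : (repDD l).length < l.length := by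
  fun_induction repDD with
  | case1 c d t hcd ih => have := repDD_length_le t; simp; omega
  | case2 c d t hcd ih =>
    have hdd : hasDD (d :: t) = true := by
      rw [hasDD_iff] at h ⊢
      rcases List.infix_cons_iff.mp h with h' | h'
      · rcases h' with ⟨r, hr⟩
        simp at hr
        exact absurd ⟨hr.1.symm, hr.2.1.symm⟩ hcd
      · exact h'
    have := ih hdd; simp at *; omega
  | case3 l hl =>
    exfalso
    match l, hl with
    | [], _ => simp [hasDD] at h
    | [c], _ => simp [hasDD_iff] at h; rcases h with ⟨r, q, hq⟩; simp [List.append_eq_cons_iff] at hq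
           -- impossible: a 2-char infix of a 1-char list
    | c :: d :: t, hl => exact hl c d t rfl

theorem replace_dd_length_lt (s : List Char) (h : PySem.Chars.isIn ['-','-'] s = true) :
    (PySem.Chars.replace s ['-','-'] ['-']).length < s.length := by
  rw [replace_eq_repDD]
  exact repDD_length_lt s ((hasDD_iff s).mpr ((PySem.Chars.isIn_iff_infix _ _).mp h))

-- port of A's `while "--" in slug: slug = slug.replace("--", "-")`
def collapseA (s : List Char) : List Char :=
  if h : PySem.Chars.isIn ['-','-'] s = true then
    collapseA (PySem.Chars.replace s ['-','-'] ['-'])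
  else s
termination_by s.length
decreasing_by exact replace_dd_length_lt s h

def customer_id_from_name_py (name : String) : String :=
  let cleaned := PySem.Str.replace (PySem.Str.lower (PySem.Str.strip (if name = "" then "unknown" else name))) "&" "and"
  let allowed := cleaned.toList.foldl (fun acc ch =>
      if PySem.Chars.isalnum ch then acc ++ [ch]
      else if ch == ' ' || ch == '-' || ch == '_' then acc ++ ['-']
      else acc) []
  let slug := collapseA (PySem.Chars.stripChars allowed ['-'])
  if slug.isEmpty then "unknown-customer" else String.ofList slug

-- ===== PORT B =====
def customer_id_from_name_py_alt (name : String) : String :=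
  let cleaned := PySem.Str.replace (PySem.Str.lower (PySem.Str.strip (if name = "" then "unknown" else name))) "&" "and"
  let r := cleaned.toList.foldl (fun s ch =>
      if PySem.Chars.isalnum ch then
        ((s.1 ++ (if s.2 && !s.1.isEmpty then ['-'] else [])) ++ [ch], false)
      else if ch == ' ' || ch == '-' || ch == '_' then (s.1, true)
      else s) ([], false)
  if r.1.isEmpty then "unknown-customer" else String.ofList r.1

-- ===== PRECONDITION & SPEC =====
def Spec_customer_id_from_name_py (name : String) (out : String) : Prop := out = customer_id_from_name_py_alt name
instance (name : String) (out : String) : Decidable (Spec_customer_id_from_name_py name out) := by unfold Spec_customer_id_from_name_py; infer_instance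

-- ===== CLAIM (what is proved, stated in full; the proofs are below) =====
def Claim_equal_customer_id_from_name_py : Prop := ∀ (name : String), Dom_customer_id_from_name_py name → Spec_customer_id_from_name_py name (customer_id_from_name_py name)

-- ===== LEMMAS AND PROOFS =====

-- collapse every run of dashes to a single dash (the net effect of A's while loop)
def squash : List Char → List Char
  | c :: d :: t => if c = '-' ∧ d = '-' then squash (d :: t) else c :: squash (d :: t)
  | l => l

-- A's per-character contribution to `allowed`
def reprC (c : Char) : List Char :=
  if PySem.Chars.isalnum c then [c]
  else if c == ' ' || c == '-' || c == '_' then ['-']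
  else []

-- strip leading and trailing dashes, phrased as Chars.stripChars unfolds
def stripD (s : List Char) : List Char :=
  (List.dropWhile (fun c => c == '-') (List.dropWhile (fun c => c == '-') s).reverse).reverse

theorem stripChars_dash (s : List Char) : PySem.Chars.stripChars s ['-'] = stripD s := by
  have hc : (fun c => List.contains ['-'] c) = (fun c : Char => c == '-') := by
    funext c; rcases eq_or_ne c '-' with h|h <;> simp [h]
  rw [PySem.Chars.stripChars, stripD]
  rw [hc]

theorem squash_eq_self (l : List Char) (h : hasDD l = false) : squash l = l := by
  fun_induction squash with
  | case1 c d t hcd ih => simp_all [hasDD, hcd.1, hcd.2]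
  | case2 c d t hcd ih =>
    have : hasDD (d :: t) = false := by
      rw [hasDD.eq_def] at h; split at h <;> simp_all
    rw [ih this]
  | case3 l hl => rfl

theorem repDD_head? (l : List Char) : (repDD l).head? = l.head? := by
  fun_induction repDD with
  | case1 c d t hcd ih => simp [hcd.1]
  | case2 c d t hcd ih => simp
  | case3 l hl => rfl

theorem squash_cons_dash (x : List Char) :
    squash ('-' :: x) = if x.head? = some '-' then squash x else '-' :: squash x := by
  cases x with
  | nil => simp [squash]
  | cons e u =>
    by_cases he : e = '-'
    · rw [squash]; simp [he]
    · rw [squash]; simp [he]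

theorem squash_cons_ne (c : Char) (hc : c ≠ '-') (x : List Char) :
    squash (c :: x) = c :: squash x := by
  cases x with
  | nil => simp [squash]
  | cons e u => rw [squash]; simp [hc]

theorem squash_repDD (l : List Char) : squash (repDD l) = squash l := by
  fun_induction repDD with
  | case1 c d t hcd ih =>
    rw [squash_cons_dash, repDD_head?, ih]
    have : squash (c :: d :: t) = squash (d :: t) := by rw [squash]; simp [hcd]
    rw [this, hcd.2, squash_cons_dash]
  | case2 c d t hcd ih =>
    by_cases hc : c = '-'
    · have hd : d ≠ '-' := fun hd => hcd ⟨hc, hd⟩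
      subst hc
      rw [squash_cons_dash, repDD_head?]
      simp only [List.head?_cons, Option.some.injEq]
      rw [if_neg (by simpa using hd), ih, squash_cons_dash]
      simp [hd]
    · rw [squash_cons_ne c hc, ih, squash_cons_ne c hc]
  | case3 l hl => rfl

theorem collapseA_eq_squash (s : List Char) : collapseA s = squash s := by
  fun_induction collapseA with
  | case1 s h ih =>
    rw [ih, replace_eq_repDD, squash_repDD]
  | case2 s h =>
    have : hasDD s = false := by
      by_contra hc
      exact h ((PySem.Chars.isIn_iff_infix _ _).mpr ((hasDD_iff s).mp (by simpa using hc)))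
    rw [squash_eq_self s this]

theorem squash_ne_nil (l : List Char) (h : l ≠ []) : squash l ≠ [] := by
  fun_induction squash with
  | case1 c d t hcd ih => exact ih (by simp)
  | case2 c d t hcd ih => simp
  | case3 l hl => exact h

theorem squash_append (w : List Char) : ∀ y : List Char, w.getLast? ≠ some '-' →
    squash (w ++ y) = squash w ++ squash y := by
  fun_induction squash with
  | case1 c d t hcd ih =>
    intro y hy
    have : squash (c :: d :: t ++ y) = squash (d :: t ++ y) := by
      rw [List.cons_append, List.cons_append, squash]; simp [hcd]
    rw [List.cons_append] at this ⊢
    rw [this, ih y (by simpa using hy)]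
  | case2 c d t hcd ih =>
    intro y hy
    have : squash (c :: d :: t ++ y) = c :: squash (d :: t ++ y) := by
      rw [List.cons_append, List.cons_append, squash]; simp [hcd]
    rw [List.cons_append] at this ⊢
    rw [this, ih y (by simpa using hy)]
    rfl
  | case3 l hl =>
    intro y hy
    match l, hl with
    | [], _ => simp
    | [c], _ =>
      have hc : c ≠ '-' := by simpa using hy
      rw [List.singleton_append, squash_cons_ne c hc]
      rfl
    | c :: d :: t, hl => exact (hl c d t rfl).elim

theorem squash_replicate_concat (k : Nat) (c : Char) (hc : c ≠ '-') :
    squash (List.replicate k '-' ++ [c]) = (if k = 0 then [] else ['-']) ++ [c] := by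
  induction k with
  | zero => simp [squash]
  | succ n ih =>
    rw [List.replicate_succ, List.cons_append, squash_cons_dash]
    cases n with
    | zero => simp [squash_cons_ne c hc, hc, squash]
    | succ m =>
      rw [if_pos (by simp [List.replicate_succ]), ih]
      simp

theorem SD_dash (u : List Char) : stripD (u ++ ['-']) = stripD u := by
  unfold stripD
  rw [List.dropWhile_append]
  by_cases h : (List.dropWhile (fun c => c == '-') u).isEmpty
  · rw [if_pos h]
    rw [List.isEmpty_iff] at h
    rw [h]
    simp
  · rw [if_neg h]
    rw [List.reverse_append]
    simp

theorem SD_keep (u : List Char) (c : Char) (hc : c ≠ '-') :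
    squash (stripD (u ++ [c])) =
      (squash (stripD u) ++ (if u.getLast? == some '-' && !(squash (stripD u)).isEmpty then ['-'] else [])) ++ [c] := by
  have hdc : (fun x : Char => x == '-') c = false := by simpa using hc
  by_cases hv : List.dropWhile (fun x : Char => x == '-') u = []
  · have hstrip : stripD u = [] := by unfold stripD; rw [hv]; simp
    have h1 : List.dropWhile (fun x : Char => x == '-') (u ++ [c]) = [c] := by
      rw [List.dropWhile_append, if_pos (by simp [hv])]
      simp [hdc]
    have h2 : stripD (u ++ [c]) = [c] := by
      unfold stripD; rw [h1]; simp [hdc]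
    rw [h2, hstrip]
    simp [squash]
  · obtain ⟨x, v', hv'⟩ : ∃ x v', List.dropWhile (fun x : Char => x == '-') u = x :: v' := by
      cases h : List.dropWhile (fun x : Char => x == '-') u with
      | nil => exact absurd h hv
      | cons a b => exact ⟨a, b, rfl⟩
    set v := x :: v' with hvdef
    have hx : (fun x : Char => x == '-') x = false := by
      have := List.head_dropWhile_not (fun x : Char => x == '-') (l := u) (by simp [hv'])
      simp [hv'] at this
      simpa using this
    set r := List.dropWhile (fun x : Char => x == '-') v.reverse with hrdef
    obtain ⟨k, hrep⟩ : ∃ k, List.takeWhile (fun x : Char => x == '-') v.reverse = List.replicate k '-' := by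
      refine ⟨(List.takeWhile (fun x : Char => x == '-') v.reverse).length, ?_⟩
      apply List.eq_replicate_iff.mpr
      refine ⟨rfl, fun y hy => ?_⟩
      have := List.mem_takeWhile_imp hy
      simpa using this
    have hsplit : v = r.reverse ++ List.replicate k '-' := by
      conv_lhs => rw [← List.reverse_reverse v,
        ← List.takeWhile_append_dropWhile (p := fun x : Char => x == '-') (l := v.reverse)]
      rw [List.reverse_append, hrep, List.reverse_replicate]
    have hstripu : stripD u = r.reverse := by
      unfold stripD; rw [hv']
    have hrne : r ≠ [] := by
      intro h0
      have : x ∈ v.reverse := by simp [hvdef]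
      have hxd := List.dropWhile_eq_nil_iff.mp h0 x this
      exact absurd hxd (by simpa using hx)
    obtain ⟨y, r', hr'⟩ : ∃ y r', r = y :: r' := by
      cases h : r with
      | nil => exact absurd h hrne
      | cons a b => exact ⟨a, b, rfl⟩
    have hy : (fun x : Char => x == '-') y = false := by
      have := List.head_dropWhile_not (fun x : Char => x == '-') (l := v.reverse) (by simp [← hrdef, hr'])
      simp [← hrdef, hr'] at this
      simpa using this
    have hyne : y ≠ '-' := by simpa using hy
    have hlast_r : r.reverse.getLast? = some y := by rw [hr']; simp
    have hstrip_uc : stripD (u ++ [c]) = v ++ [c] := by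
      unfold stripD
      rw [List.dropWhile_append, if_neg (by simp [hv']), hv']
      rw [List.reverse_append]
      simp [hdc]
    have hulast : u.getLast? = v.getLast? := by
      conv_lhs => rw [← List.takeWhile_append_dropWhile (p := fun x : Char => x == '-') (l := u), hv']
      exact List.getLast?_append_of_ne_nil _ (by simp [hvdef])
    rw [hstrip_uc, hstripu, hsplit, List.append_assoc,
        squash_append _ _ (by rw [hlast_r]; simp [hyne]),
        squash_replicate_concat k c hc]
    have hsq_ne : squash r.reverse ≠ [] := squash_ne_nil _ (by simp [hr'])
    cases k with
    | zero =>
      have : v.getLast? = some y := by rw [hsplit]; simpa using hlast_r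
      rw [hulast, this]
      simp [hyne, hsq_ne]
    | succ m =>
      have : v.getLast? = some '-' := by
        rw [hsplit, List.getLast?_append_of_ne_nil _ (by simp [List.replicate_succ])]
        rw [List.getLast?_replicate]
        simp
      rw [hulast, this]
      simp [hsq_ne]

-- B's loop state after the whole input equals A's normalised slug plus the trailing-dash flag
theorem invariantH (L : List Char) :
    L.foldl (fun s ch =>
      if PySem.Chars.isalnum ch then
        ((s.1 ++ (if s.2 && !s.1.isEmpty then ['-'] else [])) ++ [ch], false)
      else if ch == ' ' || ch == '-' || ch == '_' then (s.1, true)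
      else s) ([], false)
    = (squash (stripD (L.flatMap reprC)), (L.flatMap reprC).getLast? == some '-') := by
  induction L using List.reverseRecOn with
  | nil => simp [stripD, squash]
  | append_singleton L c ih =>
    rw [List.foldl_append, ih, List.foldl_cons, List.foldl_nil, List.flatMap_append]
    simp only [List.flatMap_cons, List.flatMap_nil, List.append_nil]
    by_cases h1 : PySem.Chars.isalnum c = true
    · have hcne : c ≠ '-' := by
        rintro rfl
        simp [show PySem.Chars.isalnum '-' = false from by decide] at h1
      have hrc : reprC c = [c] := by simp [reprC, h1]
      rw [hrc]
      simp only [h1, if_pos]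
      rw [SD_keep _ c hcne]
      simp [hcne]
    · by_cases h2 : (c == ' ' || c == '-' || c == '_') = true
      · have hrc : reprC c = ['-'] := by simp [reprC, h1, h2]
        rw [hrc]
        simp only [h1, h2, if_pos, Bool.false_eq_true, if_neg, not_false_iff]
        rw [SD_dash]
        simp
      · have hrc : reprC c = [] := by
          simp only [reprC]
          rw [if_neg (by simpa using h1), if_neg (by simpa using h2)]
        rw [hrc, List.append_nil]
        simp [h1, h2]

theorem foldlA_eq_flatMap (L : List Char) :
    L.foldl (fun acc ch =>
      if PySem.Chars.isalnum ch then acc ++ [ch]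
      else if ch == ' ' || ch == '-' || ch == '_' then acc ++ ['-']
      else acc) [] = L.flatMap reprC := by
  have hfun : (fun (acc : List Char) (ch : Char) =>
      if PySem.Chars.isalnum ch then acc ++ [ch]
      else if ch == ' ' || ch == '-' || ch == '_' then acc ++ ['-']
      else acc) = fun acc ch => acc ++ reprC ch := by
    funext acc ch
    simp only [reprC]
    split_ifs <;> simp
  rw [hfun, PySem.List.foldl_append_eq_flatMap]
  simp

-- ===== VERDICT (by name: the statement is the Claim_ definition above) =====
theorem customer_id_from_name_py_spec : Claim_equal_customer_id_from_name_py := by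
  intro name _
  show customer_id_from_name_py name = customer_id_from_name_py_alt name
  unfold customer_id_from_name_py customer_id_from_name_py_alt
  simp only [foldlA_eq_flatMap, invariantH, stripChars_dash, collapseA_eq_squash]
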